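-- pv_equiv track=rewrite | github.com/anan-ya-y/advent-of-code | utils.py | bitmask_to_set
-- ===== SOURCE A (Python) =====
-- def bitmask_to_set(b, elements):
--     s = set()
--     n = len(elements)
--     for i in range(n):
--         # &ing with 1 gets us the rightmost digit
--         if b & 1:
--             s.add(elements[i])
--         b >>= 1
--     return s
-- ===== SOURCE B (Python) =====
-- def bitmask_to_set(b, elements):
--     s = set()
--     m = b & ((1 << len(elements)) - 1)  # exactly the low len(elements) bits; always >= 0
--     while m:
--         p = (m & -m).bit_length() - 1   # position of the lowest set bit
--         s.add(elements[p])
--         m &= m - 1                      # clear that bit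
--     return s
-- ===== Notes on version B (the rewrite author's own statement) =====
-- stated objective: faster
-- what changed: Instead of scanning all len(elements) bit positions while shifting b, B masks b to its low len(elements) bits once and then visits only the set bits, extracting the lowest set bit with m&-m and clearing it with m&=m-1.
import Mathlib
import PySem

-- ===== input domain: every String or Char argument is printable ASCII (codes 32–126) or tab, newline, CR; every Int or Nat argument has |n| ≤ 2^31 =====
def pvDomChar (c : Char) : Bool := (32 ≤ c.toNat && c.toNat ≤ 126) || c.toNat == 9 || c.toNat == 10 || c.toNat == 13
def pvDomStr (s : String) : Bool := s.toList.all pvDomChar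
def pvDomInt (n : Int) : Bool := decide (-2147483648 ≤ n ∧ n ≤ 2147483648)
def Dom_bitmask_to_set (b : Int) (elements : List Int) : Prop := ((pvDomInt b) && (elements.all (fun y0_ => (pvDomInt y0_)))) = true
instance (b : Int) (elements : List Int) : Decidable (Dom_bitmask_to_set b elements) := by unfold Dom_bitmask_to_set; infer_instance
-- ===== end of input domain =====

-- B masks b to its low len(elements) bits once and iterates only over the set bits
-- (lowest-set-bit extraction), instead of A's scan of every position; objective: faster.

-- ===== PORT A =====
-- literal port of A: s = set(); for i in range(len(elements)): if b & 1: s.add(elements[i]); b >>= 1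
def bitmask_to_set (b : Int) (elements : List Int) : List Int :=
  ((PySem.List.pyRange 0 (elements.length : Int) 1).foldl
    (fun (st : PySem.Set Int × Int) i =>
      (if PySem.Int.band st.2 1 ≠ 0 then
         match PySem.List.pyGet? elements i with   -- elements[i]; i ∈ range(n) is always in range
         | some x => PySem.Set.add st.1 x
         | none => st.1
       else st.1,
       st.2 >>> (1 : Nat))) (PySem.Set.empty, b)).1

-- ===== PORT B =====
-- termination fact for B's loop (cited by decreasing_by): clearing the lowest set bit shrinks m
theorem pv_band_pred_toNat_lt (m : Int) (h : 0 < m) :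
    (PySem.Int.band m (m - 1)).toNat < m.toNat := by
  rw [PySem.Int.band_of_nonneg (by omega) (by omega)]
  have h1 : m.toNat &&& (m - 1).toNat ≤ (m - 1).toNat := Nat.and_le_right
  omega

-- literal port of B's `while m:` loop; m is always a nonnegative mask there, so `m` truthy ↔ 0 < m
-- (the `0 < m` guard also makes the recursion total on the unreachable negative inputs)
def bmLoop (elements : List Int) (s : PySem.Set Int) (m : Int) : PySem.Set Int :=
  if h : 0 < m then
    let p : Int := (PySem.Int.bitLength (PySem.Int.band m (-m)) : Int) - 1  -- (m & -m).bit_length() - 1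
    let s' : PySem.Set Int :=
      match PySem.List.pyGet? elements p with    -- elements[p]
      | some x => PySem.Set.add s x
      | none => s
    bmLoop elements s' (PySem.Int.band m (m - 1))                           -- m &= m - 1
  else s
termination_by m.toNat
decreasing_by exact pv_band_pred_toNat_lt m h

def bitmask_to_set_alt (b : Int) (elements : List Int) : List Int :=
  bmLoop elements PySem.Set.empty (PySem.Int.band b ((1 <<< elements.length) - 1))

-- ===== PRECONDITION & SPEC =====
def Spec_bitmask_to_set (b : Int) (elements : List Int) (out : List Int) : Prop := out = bitmask_to_set_alt b elements
instance (b : Int) (elements : List Int) (out : List Int) : Decidable (Spec_bitmask_to_set b elements out) := by unfold Spec_bitmask_to_set; infer_instance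

-- ===== CLAIM (what is proved, stated in full; the proofs are below) =====
def Claim_equal_bitmask_to_set : Prop := ∀ (b : Int) (elements : List Int), Dom_bitmask_to_set b elements → Spec_bitmask_to_set b elements (bitmask_to_set b elements)

-- ===== LEMMAS AND PROOFS =====

-- number of trailing zero bits of a positive Nat
def pvNtz (m : Nat) : Nat :=
  if h : m = 0 then 0
  else if m % 2 = 1 then 0
  else pvNtz (m / 2) + 1
termination_by m
decreasing_by omega

-- add elements[p] to s (p always in range where this is used)
def pvAddIx (elements : List Int) (s : PySem.Set Int) (p : Nat) : PySem.Set Int :=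
  match elements[p]? with
  | some x => PySem.Set.add s x
  | none => s

-- common reference form: scan the bits of a Nat mask along the list
def pvAuxN : List Int → Nat → PySem.Set Int → PySem.Set Int
  | [], _, s => s
  | e :: es, m, s => pvAuxN es (m / 2) (if m % 2 = 1 then PySem.Set.add s e else s)

theorem pvAuxN_zero (es : List Int) (s : PySem.Set Int) : pvAuxN es 0 s = s := by
  induction es with
  | nil => rfl
  | cons e es ih => simpa [pvAuxN] using ih

theorem pv_and_pred_odd (m : Nat) (h : m % 2 = 1) : m &&& (m - 1) = m - 1 := by
  apply Nat.eq_of_testBit_eq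
  intro i
  cases i with
  | zero =>
      have h1 : (m - 1) % 2 = 0 := by omega
      simp [Nat.testBit_zero, h, h1]
  | succ i =>
      have hd : (m - 1) / 2 = m / 2 := by omega
      rw [Nat.testBit_and, Nat.testBit_succ, Nat.testBit_succ, hd, Bool.and_self]

theorem pv_and_pred_even (a : Nat) (h : 0 < a) :
    (2 * a) &&& (2 * a - 1) = 2 * (a &&& (a - 1)) := by
  apply Nat.eq_of_testBit_eq
  intro i
  cases i with
  | zero =>
      have e1 : (2 * a) % 2 = 0 := by omega
      have e2 : (2 * (a &&& (a - 1))) % 2 = 0 := by omega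
      simp [Nat.testBit_zero, e1, e2]
  | succ i =>
      have h1 : (2 * a) / 2 = a := by omega
      have h2 : (2 * a - 1) / 2 = a - 1 := by omega
      have h3 : (2 * (a &&& (a - 1))) / 2 = a &&& (a - 1) := by omega
      rw [Nat.testBit_and, Nat.testBit_succ, Nat.testBit_succ, Nat.testBit_succ,
        h1, h2, h3, Nat.testBit_and]

theorem pv_ntz_spec (m : Nat) (h : 0 < m) :
    m &&& (m - 1) = m - 2 ^ (pvNtz m) ∧ 2 ^ (pvNtz m) ≤ m := by
  induction m using Nat.strong_induction_on with
  | _ m ih =>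
    rcases Nat.mod_two_eq_zero_or_one m with hm2 | hm2
    · -- even
      have ha : 0 < m / 2 := by omega
      have ihh := ih (m / 2) (by omega) ha
      have hv : pvNtz m = pvNtz (m / 2) + 1 := by
        rw [pvNtz]; simp [Nat.pos_iff_ne_zero.mp h, hm2]
      have hm : m = 2 * (m / 2) := by omega
      constructor
      · rw [hv]
        calc m &&& (m - 1) = (2 * (m / 2)) &&& (2 * (m / 2) - 1) := by rw [← hm]
          _ = 2 * ((m / 2) &&& (m / 2 - 1)) := pv_and_pred_even _ ha
          _ = 2 * (m / 2 - 2 ^ pvNtz (m / 2)) := by rw [ihh.1]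
          _ = m - 2 ^ (pvNtz (m / 2) + 1) := by
                have := ihh.2; rw [Nat.pow_succ]; omega
      · rw [hv, Nat.pow_succ]
        have := ihh.2; omega
    · -- odd
      have hv : pvNtz m = 0 := by
        rw [pvNtz]; simp [Nat.pos_iff_ne_zero.mp h, hm2]
      rw [hv, pv_and_pred_odd m hm2]
      simp; omega

-- m & -m over Int, for a positive Nat m, is the lowest set bit 2^(pvNtz m)
theorem pv_lowbit (m : Nat) (h : 0 < m) :
    PySem.Int.band (m : Int) (-(m : Int)) = ((2 ^ (pvNtz m) : Nat) : Int) := by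
  have hs := pv_ntz_spec m h
  have h1 : ¬ (0 : Int) ≤ -(m : Int) := by omega
  have h2 : (-(-(m : Int)) - 1) = ((m - 1 : Nat) : Int) := by omega
  rw [PySem.Int.band]
  simp only [Int.natCast_nonneg, if_true, h1, if_false, h2, Int.toNat_natCast]
  have h3 := hs.2
  have hn : m - (m - 2 ^ pvNtz m) = 2 ^ pvNtz m := by
    generalize 2 ^ pvNtz m = P at h3 ⊢
    omega
  rw [hs.1, hn]

theorem pv_band_pred_nat (m : Nat) (h : 0 < m) :
    PySem.Int.band (m : Int) ((m : Int) - 1) = ((m &&& (m - 1) : Nat) : Int) := by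
  have : ((m : Int) - 1) = ((m - 1 : Nat) : Int) := by omega
  rw [this, PySem.Int.band_natCast]

theorem pv_bitLength_two_pow (v : Nat) :
    PySem.Int.bitLength ((2 ^ v : Nat) : Int) = v + 1 := by
  have h1 := PySem.Int.lt_two_pow_bitLength ((2 ^ v : Nat) : Int)
  have h2 := PySem.Int.two_pow_bitLength_le ((2 ^ v : Nat) : Int)
    (by positivity)
  rw [Int.natAbs_natCast] at h1 h2
  have e1 : v < PySem.Int.bitLength ((2 ^ v : Nat) : Int) :=
    (Nat.pow_lt_pow_iff_right (by norm_num)).mp h1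
  have e2 : PySem.Int.bitLength ((2 ^ v : Nat) : Int) - 1 ≤ v :=
    (Nat.pow_le_pow_iff_right (by norm_num)).mp h2
  omega

-- Python % of a negative int by a positive one
theorem pv_mod_negSucc (a n : Nat) (hn : 0 < n) :
    PySem.Int.mod (Int.negSucc a) (n : Int) = ((n - 1 - a % n : Nat) : Int) := by
  rw [PySem.Int.mod_eq_emod_of_pos (by omega)]
  obtain ⟨q, r, hr, ha⟩ : ∃ q r, r < n ∧ a = n * q + r :=
    ⟨a / n, a % n, Nat.mod_lt _ hn, (Nat.div_add_mod a n).symm⟩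
  subst ha
  have hm : (n * q + r) % n = r := by
    rw [Nat.add_comm, Nat.add_mul_mod_self_left, Nat.mod_eq_of_lt hr]
  rw [hm]
  have hsplit : (Int.negSucc (n * q + r)) = ((n - 1 - r : Nat) : Int) + (n : Int) * (-(q : Int) - 1) := by
    rw [Int.negSucc_eq]
    have hc : ((n - 1 - r : Nat) : Int) = (n : Int) - 1 - (r : Int) := by omega
    rw [hc]; push_cast; ring
  rw [hsplit, Int.add_mul_emod_self_left]
  exact Int.emod_eq_of_lt (by omega) (by omega)

-- b & (2^n - 1) is b mod 2^n, for every Int b (Python-exact on negatives)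
theorem pv_mask_mod (b : Int) (n : Nat) :
    PySem.Int.band b (((2 ^ n : Nat) : Int) - 1) = PySem.Int.mod b ((2 ^ n : Nat) : Int) := by
  have hp : 0 < 2 ^ n := Nat.two_pow_pos n
  cases b with
  | ofNat m =>
      have hc : (((2 ^ n : Nat) : Int) - 1) = ((2 ^ n - 1 : Nat) : Int) := by omega
      rw [Int.ofNat_eq_natCast, hc, PySem.Int.band_natCast,
        Nat.and_two_pow_sub_one_eq_mod, PySem.Int.mod_natCast]
  | negSucc a =>
      have h1 : ¬ (0 : Int) ≤ Int.negSucc a := by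
        rw [Int.negSucc_eq]; omega
      have h2 : (0 : Int) ≤ (((2 ^ n : Nat) : Int) - 1) := by omega
      have h3 : (-(Int.negSucc a) - 1).toNat = a := by
        rw [Int.negSucc_eq]; omega
      have h4 : ((((2 ^ n : Nat) : Int) - 1)).toNat = 2 ^ n - 1 := by omega
      rw [PySem.Int.band]
      simp only [h1, if_false, h2, if_true, h3, h4]
      rw [Nat.and_comm, Nat.and_two_pow_sub_one_eq_mod, pv_mod_negSucc a _ hp]

-- parity of b agrees with the parity of b mod 2^(k+1)
theorem pv_mod_parity (b : Int) (k : Nat) :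
    ((PySem.Int.band b 1 ≠ 0) ↔ (PySem.Int.mod b ((2 ^ (k + 1) : Nat) : Int)).toNat % 2 = 1) := by
  have hp : (0 : Int) < ((2 ^ (k + 1) : Nat) : Int) := by positivity
  rw [PySem.Int.band_one, PySem.Int.mod_eq_emod_of_pos (by omega),
    PySem.Int.mod_eq_emod_of_pos hp]
  have hd : ((2 : Int)) ∣ ((2 ^ (k + 1) : Nat) : Int) := by
    refine ⟨((2 ^ k : Nat) : Int), ?_⟩
    push_cast [Nat.pow_succ]; ring
  have he : b % ((2 ^ (k + 1) : Nat) : Int) % 2 = b % 2 := Int.emod_emod_of_dvd b hd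
  have h0 : 0 ≤ b % ((2 ^ (k + 1) : Nat) : Int) := Int.emod_nonneg b (by omega)
  have h2 : 0 ≤ b % 2 := Int.emod_nonneg b (by omega)
  have h3 : b % 2 < 2 := Int.emod_lt_of_pos b (by omega)
  omega

-- shifting b right then taking k bits = taking k+1 bits then halving
theorem pv_mod_shift (b : Int) (k : Nat) :
    (PySem.Int.mod (b >>> (1 : Nat)) ((2 ^ k : Nat) : Int)).toNat
      = (PySem.Int.mod b ((2 ^ (k + 1) : Nat) : Int)).toNat / 2 := by
  have hp : 0 < 2 ^ k := Nat.two_pow_pos k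
  have hs : 2 ^ (k + 1) = 2 * 2 ^ k := by rw [Nat.pow_succ]; ring
  cases b with
  | ofNat m =>
      have h1 : (Int.ofNat m) >>> (1 : Nat) = Int.ofNat (m >>> 1) := rfl
      rw [h1, Int.ofNat_eq_natCast, Int.ofNat_eq_natCast,
        PySem.Int.mod_natCast, PySem.Int.mod_natCast,
        Nat.shiftRight_one, Int.toNat_natCast, Int.toNat_natCast, hs]
      exact (Nat.mod_mul_right_div_self m 2 (2 ^ k)).symm
  | negSucc a =>
      have h1 : (Int.negSucc a) >>> (1 : Nat) = Int.negSucc (a >>> 1) := rfl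
      rw [h1, pv_mod_negSucc _ _ hp, pv_mod_negSucc _ _ (by omega),
        Int.toNat_natCast, Int.toNat_natCast, Nat.shiftRight_one, hs]
      have h2 := Nat.mod_mul_right_div_self a 2 (2 ^ k)
      have h3 : a % (2 * 2 ^ k) < 2 * 2 ^ k := Nat.mod_lt _ (by omega)
      omega

-- A's shift-and-test fold along the list computes pvAuxN of b's low bits
theorem pv_foldA (elements : List Int) : ∀ (b : Int) (s : PySem.Set Int),
    (elements.foldl
      (fun (st : PySem.Set Int × Int) x =>
        (if PySem.Int.band st.2 1 ≠ 0 then PySem.Set.add st.1 x else st.1, st.2 >>> (1 : Nat)))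
      (s, b)).1
    = pvAuxN elements (PySem.Int.mod b ((2 ^ elements.length : Nat) : Int)).toNat s := by
  induction elements with
  | nil => intro b s; rfl
  | cons e es ih =>
      intro b s
      simp only [List.foldl_cons, pvAuxN, List.length_cons]
      rw [ih]
      rw [pv_mod_shift b es.length]
      congr 1
      by_cases hb : PySem.Int.band b 1 ≠ 0
      · rw [if_pos hb, if_pos ((pv_mod_parity b es.length).mp hb)]
      · rw [if_neg hb]
        rw [if_neg (fun hc => hb ((pv_mod_parity b es.length).mpr hc))]

-- processing the lowest set bit first, then the rest, is the same as the low-to-high scan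
theorem pv_skip (elements : List Int) : ∀ (m : Nat) (s : PySem.Set Int),
    0 < m → m < 2 ^ elements.length →
    pvAuxN elements m s = pvAuxN elements (m - 2 ^ (pvNtz m)) (pvAddIx elements s (pvNtz m)) := by
  induction elements with
  | nil =>
      intro m s h1 h2
      simp at h2
      omega
  | cons e es ih =>
      intro m s h1 h2
      rcases Nat.mod_two_eq_zero_or_one m with hm2 | hm2
      · -- even: both sides recurse into the tail with the halved mask
        have ha : 0 < m / 2 := by omega
        have hv : pvNtz m = pvNtz (m / 2) + 1 := by
          rw [pvNtz]
          simp [Nat.pos_iff_ne_zero.mp h1, hm2]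
        have hle := (pv_ntz_spec m h1).2
        have hlt : m / 2 < 2 ^ es.length := by
          rw [List.length_cons, Nat.pow_succ] at h2
          omega
        have hpow : 2 ^ (pvNtz m) = 2 * 2 ^ (pvNtz (m / 2)) := by
          rw [hv, Nat.pow_succ]
          ring
        have hK2 : ¬ (m - 2 ^ (pvNtz m)) % 2 = 1 := by omega
        have hKd : (m - 2 ^ (pvNtz m)) / 2 = m / 2 - 2 ^ (pvNtz (m / 2)) := by omega
        have haddix : pvAddIx (e :: es) s (pvNtz m) = pvAddIx es s (pvNtz (m / 2)) := by
          rw [hv]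
          simp [pvAddIx]
        simp only [pvAuxN]
        rw [if_neg (by omega : ¬ m % 2 = 1), if_neg hK2, haddix, hKd]
        exact ih (m / 2) s ha hlt
      · -- odd: the head element is added on both sides, tails coincide
        have hv : pvNtz m = 0 := by
          rw [pvNtz]
          simp [Nat.pos_iff_ne_zero.mp h1, hm2]
        have hd : (m - 2 ^ (0:Nat)) / 2 = m / 2 := by simp; omega
        have h12 : ¬ (m - 2 ^ (0:Nat)) % 2 = 1 := by simp; omega
        have haddix : pvAddIx (e :: es) s 0 = PySem.Set.add s e := by
          simp [pvAddIx]
        simp only [pvAuxN, hv]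
        rw [if_pos hm2, if_neg h12, haddix, hd]

-- B's lowest-set-bit loop computes pvAuxN
theorem pv_loopB (elements : List Int) : ∀ (m : Nat) (s : PySem.Set Int),
    m < 2 ^ elements.length → bmLoop elements s (m : Int) = pvAuxN elements m s := by
  intro m
  induction m using Nat.strong_induction_on with
  | _ m ih =>
    intro s hm
    by_cases h0 : m = 0
    · subst h0
      rw [bmLoop, pvAuxN_zero]
      simp
    · have hpos : 0 < m := by omega
      have hsp := pv_ntz_spec m hpos
      have hvlt : pvNtz m < elements.length := by
        by_contra hge
        have : 2 ^ elements.length ≤ 2 ^ (pvNtz m) :=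
          Nat.pow_le_pow_right (by norm_num) (by omega)
        omega
      rw [bmLoop, dif_pos (by omega : (0 : Int) < (m : Int))]
      simp only
      rw [pv_lowbit m hpos, pv_bitLength_two_pow]
      have hidx : ((pvNtz m + 1 : Nat) : Int) - 1 = ((pvNtz m : Nat) : Int) := by push_cast; ring
      rw [hidx, PySem.List.pyGet?_natCast]
      rw [pv_band_pred_nat m hpos, hsp.1]
      have hp2 : 0 < 2 ^ pvNtz m := Nat.two_pow_pos _
      rw [ih (m - 2 ^ (pvNtz m)) (by omega) _ (by omega)]
      have hmatch : (match elements[pvNtz m]? with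
          | some x => PySem.Set.add s x
          | none => s) = pvAddIx elements s (pvNtz m) := rfl
      rw [hmatch, ← pv_skip elements m s hpos hm]

-- ===== VERDICT (by name: the statement is the Claim_ definition above) =====
theorem bitmask_to_set_spec : Claim_equal_bitmask_to_set := by
  intro b elements _
  unfold Spec_bitmask_to_set bitmask_to_set bitmask_to_set_alt
  -- A side: the pyRange fold is the fold along the list
  rw [PySem.List.foldl_congr_mem _ _
    (fun (st : PySem.Set Int × Int) i =>
      (if PySem.Int.band st.2 1 ≠ 0 then
        PySem.Set.add st.1 (PySem.List.pyGetD elements i 0) else st.1, st.2 >>> (1 : Nat))) _ ?hcongr]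
  · rw [PySem.List.foldl_pyRange_zero_pyGetD' elements 0
      (fun (st : PySem.Set Int × Int) x =>
        (if PySem.Int.band st.2 1 ≠ 0 then PySem.Set.add st.1 x else st.1, st.2 >>> (1 : Nat)))
      (PySem.Set.empty, b)]
    rw [pv_foldA elements b PySem.Set.empty]
    -- B side
    have hsh : ((1 <<< elements.length : Nat) : Int) = ((2 ^ elements.length : Nat) : Int) := by
      rw [Nat.one_shiftLeft]
    rw [hsh, pv_mask_mod b elements.length]
    have hp : (0 : Int) < ((2 ^ elements.length : Nat) : Int) := by positivity
    have h0 : 0 ≤ PySem.Int.mod b ((2 ^ elements.length : Nat) : Int) :=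
      PySem.Int.mod_nonneg b hp
    have hlt : PySem.Int.mod b ((2 ^ elements.length : Nat) : Int)
        < ((2 ^ elements.length : Nat) : Int) := PySem.Int.mod_lt b hp
    have hcast : PySem.Int.mod b ((2 ^ elements.length : Nat) : Int)
        = (((PySem.Int.mod b ((2 ^ elements.length : Nat) : Int)).toNat : Nat) : Int) := by omega
    rw [hcast, pv_loopB elements _ PySem.Set.empty (by omega), Int.toNat_natCast]
  case hcongr =>
    intro acc x hx
    have hmem := (PySem.List.mem_pyRange_one).mp hx
    have hsome := PySem.List.pyGet?_eq_some_getElem elements hmem.1 (by exact_mod_cast hmem.2)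
    rw [hsome]
    show (if PySem.Int.band acc.2 1 ≠ 0 then PySem.Set.add acc.1 elements[x.toNat] else acc.1,
           acc.2 >>> (1 : Nat))
        = (if PySem.Int.band acc.2 1 ≠ 0 then
             PySem.Set.add acc.1 (PySem.List.pyGetD elements x 0) else acc.1,
           acc.2 >>> (1 : Nat))
    rw [PySem.List.pyGetD_of_nonneg elements 0 hmem.1]
    have hg : elements.getD x.toNat 0 = elements[x.toNat] :=
      List.getD_eq_getElem elements 0 (by omega)
    rw [hg]
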